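-- pv_equiv track=rewrite | github.com/theabbie/leetcode | miscellaneous/Chef_and_Good_Array.py | checksum
-- ===== SOURCE A (Python) =====
-- def checksum(arr, s):
--     n = len(arr)
--     right = {}
--     pos = [float('inf')] * n
--     for i in range(n - 1, -1, -1):
--         if s - arr[i] in right:
--             pos[i] = right[s - arr[i]]
--         right[arr[i]] = i
--     prev = n
--     deletions = 0
--     for i in range(n - 1, -1, -1):
--         if pos[i] < prev:
--             deletions += prev - pos[i] - 1
--             deletions += pos[i] - i - 1
--             prev = i
--     deletions += prev
--     return deletions
-- ===== SOURCE B (Python) =====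
-- def checksum(arr, s):
--     # One fused right-to-left pass; each gap-sum contribution prev - comp - 1 + comp - i - 1
--     # telescopes, so the answer is simply n - 2 * (number of selected pairs).
--     n = len(arr)
--     right = {}
--     prev = n
--     pairs = 0
--     for i in range(n - 1, -1, -1):
--         comp = right.get(s - arr[i])
--         if comp is not None and comp < prev:
--             pairs += 1
--             prev = i
--         right[arr[i]] = i
--     return n - 2 * pairs
-- ===== Notes on version B (the rewrite author's own statement) =====
-- stated objective: simpler
-- what changed: Fuses the two right-to-left passes into one (dropping the pos array) and replaces the gap-sum accumulation by the telescoped closed form n - 2*pairs, so only the complement dict, prev and a pair counter are maintained.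
import Mathlib
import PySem

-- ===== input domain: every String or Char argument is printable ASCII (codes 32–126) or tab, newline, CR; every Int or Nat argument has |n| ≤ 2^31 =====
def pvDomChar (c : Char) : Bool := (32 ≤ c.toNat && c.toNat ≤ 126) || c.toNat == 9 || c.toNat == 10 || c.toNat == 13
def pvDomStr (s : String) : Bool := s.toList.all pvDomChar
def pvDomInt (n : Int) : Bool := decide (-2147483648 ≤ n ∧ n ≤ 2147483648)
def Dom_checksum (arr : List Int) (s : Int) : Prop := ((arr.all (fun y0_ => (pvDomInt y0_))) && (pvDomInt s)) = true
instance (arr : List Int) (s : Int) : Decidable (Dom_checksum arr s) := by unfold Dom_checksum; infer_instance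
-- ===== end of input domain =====

-- B fuses A's two right-to-left passes into one and returns the telescoped closed form
-- n - 2*pairs instead of accumulating gap sums; proved to return A's exact value.

-- ===== PORT A =====
-- Pass 1 (i from n-1 downto 0): pos[i] = right[s-arr[i]] if present (float('inf') sentinel
-- modelled exactly as `none`: inf < prev is always false for the finite prev A uses),
-- then right[arr[i]] = i. Structural recursion processes the tail (higher indices) first.
def checksumPass1 (arr : List Int) (s : Int) (i : Int) :
    PySem.Dict Int Int × List (Option Int) :=
  match arr with
  | [] => (PySem.Dict.mk [], [])
  | x :: xs =>
    let (right, rest) := checksumPass1 xs s (i + 1)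
    let p := if right.contains (s - x) then right.get? (s - x) else none
    (right.insert x i, p :: rest)

-- Pass 2 (i from n-1 downto 0) over pos with state (prev, deletions); tail processed first.
def checksumPass2 (pos : List (Option Int)) (i : Int) (n : Int) : Int × Int :=
  match pos with
  | [] => (n, 0)
  | p :: rest =>
    let (prev, del) := checksumPass2 rest (i + 1) n
    match p with
    | some q => if q < prev then (i, del + (prev - q - 1) + (q - i - 1)) else (prev, del)
    | none => (prev, del)

def checksum (arr : List Int) (s : Int) : Int :=
  let n : Int := arr.length
  let pos := (checksumPass1 arr s 0).2
  let (prev, del) := checksumPass2 pos 0 n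
  del + prev

-- ===== PORT B =====
-- Single fused right-to-left loop maintaining (right, prev, pairs); answer n - 2*pairs.
def checksumAltGo (arr : List Int) (s : Int) (i : Int) (n : Int) :
    PySem.Dict Int Int × Int × Int :=
  match arr with
  | [] => (PySem.Dict.mk [], n, 0)
  | x :: xs =>
    let (right, prev, pairs) := checksumAltGo xs s (i + 1) n
    let (prev', pairs') :=
      match right.get? (s - x) with
      | some c => if c < prev then (i, pairs + 1) else (prev, pairs)
      | none => (prev, pairs)
    (right.insert x i, prev', pairs')

def checksum_alt (arr : List Int) (s : Int) : Int :=
  let n : Int := arr.length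
  n - 2 * (checksumAltGo arr s 0 n).2.2

-- ===== PRECONDITION & SPEC =====
def Spec_checksum (arr : List Int) (s : Int) (out : Int) : Prop := out = checksum_alt arr s
instance (arr : List Int) (s : Int) (out : Int) : Decidable (Spec_checksum arr s out) := by unfold Spec_checksum; infer_instance

-- ===== CLAIM (what is proved, stated in full; the proofs are below) =====
def Claim_equal_checksum : Prop := ∀ (arr : List Int) (s : Int), Dom_checksum arr s → Spec_checksum arr s (checksum arr s)

-- ===== LEMMAS AND PROOFS =====

-- Invariant: the two-pass pipeline and the fused loop keep the same dict and prev,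
-- and deletions = n - prev - 2*pairs (the gap sums telescope).
theorem checksum_invariant (arr : List Int) (s : Int) (i n : Int) :
    (checksumPass1 arr s i).1 = (checksumAltGo arr s i n).1 ∧
    (checksumPass2 (checksumPass1 arr s i).2 i n).1 = (checksumAltGo arr s i n).2.1 ∧
    (checksumPass2 (checksumPass1 arr s i).2 i n).2
      = n - (checksumAltGo arr s i n).2.1 - 2 * (checksumAltGo arr s i n).2.2 := by
  induction arr generalizing i with
  | nil => simp [checksumPass1, checksumPass2, checksumAltGo]
  | cons x xs ih =>
    obtain ⟨hd, hp, hdel⟩ := ih (i + 1)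
    simp only [checksumPass1, checksumPass2, checksumAltGo]
    rw [hd]
    cases hc : ((checksumAltGo xs s (i+1) n).1).get? (s - x) with
    | none =>
      have hcon : ((checksumAltGo xs s (i+1) n).1).contains (s - x) = false :=
        (PySem.Dict.get?_eq_none_iff_contains _ _).mp hc
      simp [hcon, hp, hdel]
    | some c =>
      have hcon : ((checksumAltGo xs s (i+1) n).1).contains (s - x) = true := by
        by_contra h
        rw [(PySem.Dict.get?_eq_none_iff_contains _ _).mpr (by revert h; cases ((checksumAltGo xs s (i+1) n).1).contains (s - x) <;> simp)] at hc
        simp at hc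
      simp only [hcon, if_true, hp, hdel]
      by_cases hlt : c < (checksumAltGo xs s (i+1) n).2.1
      · simp [hlt]; ring
      · simp [hlt]

-- ===== VERDICT (by name: the statement is the Claim_ definition above) =====
theorem checksum_spec : Claim_equal_checksum := by
  intro arr s _
  unfold Spec_checksum checksum checksum_alt
  obtain ⟨_, hp, hdel⟩ := checksum_invariant arr s 0 (arr.length : Int)
  simp only [hp, hdel]
  ring
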